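-- pv_equiv track=rewrite | github.com/theriley106/Leetcode-Archive | code/Rotated-Digits.py | can_rotate
-- ===== SOURCE A (Python) =====
-- NUM_DICT = {'1': '1', '5': '2', '2': '5',
--             '6': '9', '9': '6', '0': '0', '8': '8'}
--
-- def can_rotate(num):
--     rotate = ''
--     num = str(num)
--     for val in num:
--         if (val not in NUM_DICT):
--             return False
--         else:
--             rotate += NUM_DICT[val]
--     return (num != rotate)
-- ===== SOURCE B (Python) =====
-- VALID = {'0', '1', '8', '2', '5', '6', '9'}
-- CHANGING = {'2', '5', '6', '9'}
--
-- def can_rotate(num):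
--     s = str(num)
--     return set(s) <= VALID and bool(set(s) & CHANGING)
-- ===== Notes on version B (the rewrite author's own statement) =====
-- stated objective: simpler
-- what changed: B replaces A's character-by-character construction of the rotated string and final string comparison with two set tests: all digits valid and at least one self-changing digit (0,1,8 rotate to themselves).
import Mathlib
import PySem

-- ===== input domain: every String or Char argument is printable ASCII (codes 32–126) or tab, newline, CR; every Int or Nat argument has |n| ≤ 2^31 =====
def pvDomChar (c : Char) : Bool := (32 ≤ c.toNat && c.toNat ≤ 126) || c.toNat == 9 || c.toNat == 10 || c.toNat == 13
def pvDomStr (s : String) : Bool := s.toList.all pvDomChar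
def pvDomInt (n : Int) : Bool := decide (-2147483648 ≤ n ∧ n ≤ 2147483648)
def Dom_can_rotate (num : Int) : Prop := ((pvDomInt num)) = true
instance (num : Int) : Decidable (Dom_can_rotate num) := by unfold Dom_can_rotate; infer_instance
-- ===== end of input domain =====

-- B replaces A's rotated-string construction + comparison with two set tests (all digits valid, some digit self-changing); same O(n) cost, simpler.
-- ===== PORT A =====
def NUM_DICT : PySem.Dict Char Char :=
  PySem.Dict.ofList [('1','1'),('5','2'),('2','5'),('6','9'),('9','6'),('0','0'),('8','8')]

-- the for-loop of A: early-return False on a char outside the dict, else extend `rotate`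
def canRotateLoop (s0 : List Char) : List Char → List Char → Bool
  | [], rotate => decide (s0 ≠ rotate)
  | c :: rest, rotate =>
    match NUM_DICT.get? c with
    | none => false
    | some r => canRotateLoop s0 rest (rotate ++ [r])

def can_rotate (num : Int) : Bool :=
  let s := (PySem.Int.toStr num).toList
  canRotateLoop s s []

-- ===== PORT B =====
def VALID : List Char := ['0','1','8','2','5','6','9']      -- PySem.Set of Source B's VALID
def CHANGING : List Char := ['2','5','6','9']               -- PySem.Set of Source B's CHANGING

def can_rotate_alt (num : Int) : Bool :=
  let s := (PySem.Int.toStr num).toList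
  s.all (fun c => c ∈ VALID) && s.any (fun c => c ∈ CHANGING)

-- ===== PRECONDITION & SPEC =====
def Spec_can_rotate (num : Int) (out : Bool) : Prop := out = can_rotate_alt num
instance (num : Int) (out : Bool) : Decidable (Spec_can_rotate num out) := by unfold Spec_can_rotate; infer_instance

-- ===== CLAIM (what is proved, stated in full; the proofs are below) =====
def Claim_equal_can_rotate : Prop := ∀ (num : Int), Dom_can_rotate num → Spec_can_rotate num (can_rotate num)

-- ===== LEMMAS AND PROOFS =====

-- ===== VERDICT (by name: the statement is the Claim_ definition above) =====
-- total rotation map (get? with identity default), used only in the proofs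
def rotF (c : Char) : Char := (NUM_DICT.get? c).getD c

theorem num_dict_mk : NUM_DICT = PySem.Dict.mk [('1','1'),('5','2'),('2','5'),('6','9'),('9','6'),('0','0'),('8','8')] := by
  decide

theorem isSome_get_eq_valid (c : Char) : (NUM_DICT.get? c).isSome = decide (c ∈ VALID) := by
  simp [num_dict_mk, VALID, PySem.Dict.get?_mk_cons]
  split_ifs <;> (try subst_vars) <;> simp_all [PySem.Dict.get?, eq_comm]

theorem rotF_eq_self_iff (c : Char) (h : c ∈ VALID) : rotF c = c ↔ c ∉ CHANGING := by
  fin_cases h <;> decide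

theorem loop_eq (s0 : List Char) (rest acc : List Char) :
    canRotateLoop s0 rest acc =
      if rest.all (fun c => (NUM_DICT.get? c).isSome) then decide (s0 ≠ acc ++ rest.map rotF)
      else false := by
  induction rest generalizing acc with
  | nil => simp [canRotateLoop]
  | cons c rest ih =>
    cases hc : NUM_DICT.get? c with
    | none => simp [canRotateLoop, hc]
    | some r => simp [canRotateLoop, hc, ih, rotF]

theorem map_eq_self_iff (s : List Char) (h : ∀ c ∈ s, c ∈ VALID) :
    s.map rotF = s ↔ s.any (fun c => c ∈ CHANGING) = false := by
  induction s with
  | nil => simp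
  | cons c rest ih =>
    simp only [List.map_cons, List.any_cons, List.cons.injEq, Bool.or_eq_false_iff]
    rw [ih (fun x hx => h x (List.mem_cons_of_mem _ hx)),
        rotF_eq_self_iff c (h c (List.mem_cons_self ..))]
    simp

theorem can_rotate_spec : Claim_equal_can_rotate := by
  intro num _
  unfold Spec_can_rotate can_rotate can_rotate_alt
  simp only
  rw [loop_eq]
  simp only [isSome_get_eq_valid, List.nil_append]
  by_cases hall : ((PySem.Int.toStr num).toList.all fun c => decide (c ∈ VALID)) = true
  · have hv : ∀ c ∈ (PySem.Int.toStr num).toList, c ∈ VALID := by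
      simpa [List.all_eq_true] using hall
    rw [if_pos hall, hall, Bool.true_and]
    cases hany : ((PySem.Int.toStr num).toList.any fun c => decide (c ∈ CHANGING)) with
    | false =>
      have hmap := (map_eq_self_iff _ hv).mpr hany
      simp only [PySem.Int.toList_toStr] at hmap
      simp [hmap]
    | true =>
      have hne : (PySem.Int.toStr num).toList ≠
          List.map rotF (PySem.Int.toStr num).toList := by
        intro h
        rw [(map_eq_self_iff _ hv).mp h.symm] at hany
        cases hany
      simp only [PySem.Int.toList_toStr] at hne
      simp [hne]
  · rw [if_neg hall]
    simp only [Bool.not_eq_true] at hall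
    rw [hall, Bool.false_and]
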